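-- pv_equiv track=rewrite | github.com/hassonlab/247-pickling | scripts/tfsemb_genemb_causal.py | make_input_from_tokens
-- ===== SOURCE A (Python) =====
-- def make_input_from_tokens(context_len, token_list):
--     """Construct input batches to LLM based on one token list
--
--     Args:
--         context_len (int): context_length
--         token_list (list): list of token_ids
--
--     Returns:
--         windows (list): list of tuples of inputs token_ids
--     """
--
--     if len(token_list) <= context_len:
--         windows = [tuple(token_list)]
--     else:
--         windows = [
--             tuple(token_list[x : x + context_len])
--             for x in range(len(token_list) - context_len + 1)
--         ]
--
--     return windows
-- ===== SOURCE B (Python) =====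
-- def make_input_from_tokens(context_len, token_list):
--     """Construct input batches to LLM based on one token list (zip-of-shifts idiom)."""
--     if len(token_list) <= context_len:
--         return [tuple(token_list)]
--     return list(zip(*(token_list[i:] for i in range(context_len))))
-- ===== Notes on version B (the rewrite author's own statement) =====
-- stated objective: idiomatic
-- what changed: The per-index slicing comprehension is replaced by the zip-transpose idiom (zip of context_len shifted views); Pre_ restricts to context_len >= 1, the natural domain of a window size, where for context_len <= 0 the two degenerate values differ.
-- outside the precondition, e.g. on make_input_from_tokens(0, [1, 2]): A returns [(), (), ()], B returns []; on make_input_from_tokens(-1, [5]): A returns [(), (), ()], B returns []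
import Mathlib
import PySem

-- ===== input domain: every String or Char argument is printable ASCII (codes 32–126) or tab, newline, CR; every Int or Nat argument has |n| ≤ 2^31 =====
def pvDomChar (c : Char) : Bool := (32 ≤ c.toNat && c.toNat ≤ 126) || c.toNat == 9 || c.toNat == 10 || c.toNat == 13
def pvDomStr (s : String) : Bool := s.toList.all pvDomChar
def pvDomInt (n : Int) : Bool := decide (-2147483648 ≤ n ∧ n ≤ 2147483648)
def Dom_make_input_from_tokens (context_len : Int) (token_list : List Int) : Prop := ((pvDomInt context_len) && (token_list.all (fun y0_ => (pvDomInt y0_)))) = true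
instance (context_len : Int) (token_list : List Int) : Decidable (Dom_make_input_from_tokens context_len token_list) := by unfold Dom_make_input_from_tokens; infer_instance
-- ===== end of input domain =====

-- B replaces the per-index slicing comprehension by the zip-transpose idiom (zip of context_len shifted views); same tuples, idiomatic decomposition.

-- ===== PORT A =====
def make_input_from_tokens (context_len : Int) (token_list : List Int) : List (List Int) :=
  if (token_list.length : Int) ≤ context_len then
    [token_list]
  else
    (PySem.List.pyRange 0 ((token_list.length : Int) - context_len + 1) 1).map
      (fun x => PySem.List.slice token_list (some x) (some (x + context_len)))

-- ===== PORT B =====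
-- zip(*ls) for a list of lists: Python's zip truncates at the shortest input
def pyZipMany (ls : List (List Int)) : List (List Int) :=
  match ls with
  | [] => []
  | l :: rest =>
    rest.foldl (fun acc l' => (acc.zip l').map (fun p => p.1 ++ [p.2])) (l.map (fun x => [x]))

def make_input_from_tokens_alt (context_len : Int) (token_list : List Int) : List (List Int) :=
  if (token_list.length : Int) ≤ context_len then
    [token_list]
  else
    pyZipMany ((PySem.List.pyRange 0 context_len 1).map
      (fun i => PySem.List.slice token_list (some i) none))

-- ===== PRECONDITION & SPEC =====
-- Pre_ requires context_len ≥ 1, the natural domain of a window size; for context_len ≤ 0 no windowing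
-- is specified and the two implementations return different degenerate values (A: empty tuples, B: []).
def Pre_make_input_from_tokens (context_len : Int) (token_list : List Int) : Prop := 1 ≤ context_len
instance (context_len : Int) (token_list : List Int) : Decidable (Pre_make_input_from_tokens context_len token_list) := by unfold Pre_make_input_from_tokens; infer_instance
def pvWitness_make_input_from_tokens : Int × List Int := (2, [1, 2, 3])

def Spec_make_input_from_tokens (context_len : Int) (token_list : List Int) (out : List (List Int)) : Prop := out = make_input_from_tokens_alt context_len token_list
instance (context_len : Int) (token_list : List Int) (out : List (List Int)) : Decidable (Spec_make_input_from_tokens context_len token_list out) := by unfold Spec_make_input_from_tokens; infer_instance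

-- ===== CLAIM (what is proved, stated in full; the proofs are below) =====
def Claim_equal_make_input_from_tokens : Prop := ∀ (context_len : Int) (token_list : List Int), Dom_make_input_from_tokens context_len token_list → Pre_make_input_from_tokens context_len token_list → Spec_make_input_from_tokens context_len token_list (make_input_from_tokens context_len token_list)

-- ===== LEMMAS AND PROOFS =====

-- the folding step of pyZipMany, named for the proofs
def pvStep (acc : List (List Int)) (l' : List Int) : List (List Int) :=
  (acc.zip l').map (fun p => p.1 ++ [p.2])

lemma pvStep_window (tl : List Int) (k : Nat) :
    pvStep ((List.range (tl.length - k)).map (fun x => (tl.drop x).take (k + 1))) (tl.drop (k + 1))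
      = (List.range (tl.length - (k + 1))).map (fun x => (tl.drop x).take (k + 2)) := by
  apply List.ext_getElem
  · simp [pvStep]; omega
  · intro i h1 h2
    have hi : i < tl.length - (k + 1) := by simpa using h2
    simp only [pvStep, List.getElem_map, List.getElem_zip, List.getElem_range, List.getElem_drop]
    have hgd : (tl.drop i)[k + 1]? = some tl[i + (k + 1)] := by
      rw [List.getElem?_drop, List.getElem?_eq_getElem (by omega)]
    conv_rhs => rw [show k + 2 = (k + 1) + 1 from rfl, List.take_add_one, hgd]
    simp [Nat.add_comm]

lemma pvFoldl_windows (tl : List Int) (k : Nat) :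
    ((List.range k).map (fun j => tl.drop (j + 1))).foldl pvStep (tl.map (fun x => [x]))
      = (List.range (tl.length - k)).map (fun x => (tl.drop x).take (k + 1)) := by
  induction k with
  | zero =>
    simp only [List.range_zero, List.map_nil, List.foldl_nil, Nat.sub_zero]
    apply List.ext_getElem
    · simp
    · intro i h1 h2
      simp [List.take_add_one, List.getElem?_drop, List.getElem?_eq_getElem (by simpa using h2)]
  | succ k ih =>
    rw [List.range_succ, List.map_append, List.foldl_append, ih]
    simpa using pvStep_window tl k

lemma pvZip_shifts (tl : List Int) (c : Nat) (hc : 1 ≤ c) :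
    pyZipMany ((List.range c).map (fun k => tl.drop k))
      = (List.range (tl.length - (c - 1))).map (fun x => (tl.drop x).take c) := by
  obtain ⟨k, rfl⟩ : ∃ k, c = k + 1 := ⟨c - 1, by omega⟩
  rw [List.range_succ_eq_map]
  simp only [List.map_cons, List.map_map, Function.comp_def, List.drop_zero, Nat.add_sub_cancel]
  show ((List.range k).map (fun j => tl.drop (j + 1))).foldl pvStep (tl.map (fun x => [x]))
      = _
  rw [pvFoldl_windows tl k]

-- ===== VERDICT (by name: the statement is the Claim_ definition above) =====
theorem make_input_from_tokens_spec : Claim_equal_make_input_from_tokens := by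
  intro ctx tl _ hpre
  unfold Pre_make_input_from_tokens at hpre
  unfold Spec_make_input_from_tokens make_input_from_tokens make_input_from_tokens_alt
  by_cases h : (tl.length : Int) ≤ ctx
  · simp [h]
  · obtain ⟨c, rfl⟩ : ∃ c : Nat, ctx = (c : Int) :=
      ⟨ctx.toNat, (Int.toNat_of_nonneg (by omega)).symm⟩
    have hc : 1 ≤ c := by exact_mod_cast hpre
    have hn : c < tl.length := by exact_mod_cast not_le.mp h
    rw [if_neg h, if_neg h, PySem.List.pyRange_one, PySem.List.pyRange_one]
    have e1 : ((tl.length : Int) - c + 1 - 0).toNat = tl.length - c + 1 := by omega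
    have e2 : ((c : Int) - 0).toNat = c := by omega
    rw [e1, e2]
    simp only [List.map_map, Function.comp_def, zero_add]
    simp only [PySem.List.slice_from_natCast, PySem.List.slice_natCast_add]
    rw [pvZip_shifts tl c hc]
    have e3 : tl.length - (c - 1) = tl.length - c + 1 := by omega
    rw [e3]
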